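-- pv_equiv track=rewrite | github.com/ajmayran/km-system-v2 | chatbot/services.py | _generate_dynamic_suggestions
-- ===== SOURCE A (Python) =====
-- def _generate_dynamic_suggestions(query, similar_content):
--     """Generate contextual suggestions based on AI analysis"""
--     suggestions = []
--
--     # Analyze query intent for better suggestions
--     query_words = query.lower().split()
--
--     # Domain-specific suggestions
--     if any(word in query_words for word in ['farm', 'crop', 'plant', 'agriculture']):
--         suggestions.extend([
--             "Tell me about sustainable farming practices",
--             "What are the latest agricultural technologies?",
--             "Find crop disease management guides"
--         ])
--     elif any(word in query_words for word in ['fish', 'aqua', 'tilapia', 'pond']):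
--         suggestions.extend([
--             "Explain aquaculture best practices",
--             "Show me fish farming techniques",
--             "What are common fish diseases?"
--         ])
--     elif any(word in query_words for word in ['cmi', 'office', 'contact', 'location']):
--         suggestions.extend([
--             "Find all CMI office locations",
--             "How to contact CMI experts?",
--             "What services does CMI provide?"
--         ])
--
--     # Add suggestions based on similar content
--     for match in similar_content[:2]:
--         resource = match['resource']
--         if resource['type'] == 'faq':
--             suggestions.append(f"More about: {resource['title'][:35]}...")
--         elif resource['type'] == 'forum':
--             suggestions.append(f"Join discussion: {resource['title'][:30]}...")
--
--     # Fallback suggestions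
--     while len(suggestions) < 3:
--         fallback = [
--             "What can you help me with?",
--             "Show me popular topics",
--             "Find expert discussions"
--         ]
--         for sug in fallback:
--             if sug not in suggestions:
--                 suggestions.append(sug)
--                 break
--         break
--
--     return suggestions[:3]
-- ===== SOURCE B (Python) =====
-- # B looks each query word up in a keyword->group-index map and takes the
-- # minimal hit index (A's elif chain = smallest matching group); a matched
-- # group IS the whole answer because of A's trailing [:3].  The title line
-- # comes from a type->(prefix, width) table, and the "fallback" is a plain
-- # unconditional append: with no group matched there are at most two title
-- # lines, each starting with a prefix no fallback string shares, so A's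
-- # membership scan always selects the first fallback.
--
-- _KEYWORD_GROUP = {
--     'farm': 0, 'crop': 0, 'plant': 0, 'agriculture': 0,
--     'fish': 1, 'aqua': 1, 'tilapia': 1, 'pond': 1,
--     'cmi': 2, 'office': 2, 'contact': 2, 'location': 2,
-- }
--
-- _GROUP_SUGS = [
--     ["Tell me about sustainable farming practices",
--      "What are the latest agricultural technologies?",
--      "Find crop disease management guides"],
--     ["Explain aquaculture best practices",
--      "Show me fish farming techniques",
--      "What are common fish diseases?"],
--     ["Find all CMI office locations",
--      "How to contact CMI experts?",
--      "What services does CMI provide?"],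
-- ]
--
-- _TITLE_FMT = {'faq': ('More about: ', 35), 'forum': ('Join discussion: ', 30)}
--
--
-- def _generate_dynamic_suggestions(query, similar_content):
--     hits = [_KEYWORD_GROUP[w] for w in query.lower().split() if w in _KEYWORD_GROUP]
--     if hits:
--         return list(_GROUP_SUGS[min(hits)])
--     out = []
--     for match in similar_content[:2]:
--         resource = match['resource']
--         fmt = _TITLE_FMT.get(resource['type'])
--         if fmt is not None:
--             out.append(fmt[0] + resource['title'][:fmt[1]] + "...")
--     out.append("What can you help me with?")
--     return out
-- ===== Notes on version B (the rewrite author's own statement) =====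
-- stated objective: alternative
-- what changed: B replaces A's if/elif chain of per-group membership scans by a keyword->group-index hash map (minimum hit index picks the group, which is the whole answer because of A's trailing [:3]), replaces the per-type branch by a type->(prefix,width) lookup table, and replaces A's one-shot while/for/break fallback scan by a single unconditional append, justified by the prefix argument that no formatted title can equal a fallback string.
import Mathlib
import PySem

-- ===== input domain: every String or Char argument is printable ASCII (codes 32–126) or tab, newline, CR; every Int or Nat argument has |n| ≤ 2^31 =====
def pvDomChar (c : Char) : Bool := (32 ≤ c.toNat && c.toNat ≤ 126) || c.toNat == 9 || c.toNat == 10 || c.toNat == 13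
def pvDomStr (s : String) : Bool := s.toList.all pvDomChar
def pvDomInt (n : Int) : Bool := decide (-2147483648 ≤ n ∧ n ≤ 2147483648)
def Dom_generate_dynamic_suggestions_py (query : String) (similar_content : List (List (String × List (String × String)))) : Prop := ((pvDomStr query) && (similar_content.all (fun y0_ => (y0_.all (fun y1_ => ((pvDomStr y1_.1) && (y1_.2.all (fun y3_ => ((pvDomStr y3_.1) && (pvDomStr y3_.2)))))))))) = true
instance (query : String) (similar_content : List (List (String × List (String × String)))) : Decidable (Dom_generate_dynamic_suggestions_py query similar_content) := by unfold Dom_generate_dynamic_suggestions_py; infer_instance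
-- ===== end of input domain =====

-- B replaces A's if/elif group scans by a keyword->group-index map (minimum hit index; A's
-- trailing [:3] makes the matched triple the whole answer), the per-type branch by a
-- type->(prefix,width) table, and the one-shot while/for/break fallback by one unconditional
-- append (no formatted title can equal a fallback string); objective: alternative. Equivalence
-- is about return values on inputs where A raises no KeyError (see Pre_).

-- ===== PORT A =====
-- one body of A's `for match in similar_content[:2]` loop; where Python raises KeyError
-- (missing 'resource'/'type'/'title') the lookup's `.getD` default stands in — excluded by Pre_
def pyA_emit (suggestions : List String) (m : List (String × List (String × String))) : List String :=
  let resource : List (String × String) := ((PySem.Dict.mk m).get? "resource").getD []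
  let t : String := ((PySem.Dict.mk resource).get? "type").getD ""
  if t == "faq" then
    suggestions ++ ["More about: " ++ PySem.Str.slice (((PySem.Dict.mk resource).get? "title").getD "") none (some 35) ++ "..."]
  else if t == "forum" then
    suggestions ++ ["Join discussion: " ++ PySem.Str.slice (((PySem.Dict.mk resource).get? "title").getD "") none (some 30) ++ "..."]
  else suggestions

def generate_dynamic_suggestions_py (query : String) (similar_content : List (List (String × List (String × String)))) : List String :=
  let query_words := PySem.Str.split₀ (PySem.Str.lower query)
  let suggestions : List String :=
    if (["farm", "crop", "plant", "agriculture"].any fun w => query_words.contains w) then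
      ["Tell me about sustainable farming practices",
       "What are the latest agricultural technologies?",
       "Find crop disease management guides"]
    else if (["fish", "aqua", "tilapia", "pond"].any fun w => query_words.contains w) then
      ["Explain aquaculture best practices",
       "Show me fish farming techniques",
       "What are common fish diseases?"]
    else if (["cmi", "office", "contact", "location"].any fun w => query_words.contains w) then
      ["Find all CMI office locations",
       "How to contact CMI experts?",
       "What services does CMI provide?"]
    else []
  let suggestions := (PySem.List.slice similar_content none (some 2)).foldl pyA_emit suggestions
  -- the while loop runs its body at most once (unconditional break at the end)
  let suggestions :=
    if suggestions.length < 3 then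
      match ["What can you help me with?", "Show me popular topics", "Find expert discussions"].find?
              (fun sug => !(suggestions.contains sug)) with
      | some sug => suggestions ++ [sug]
      | none => suggestions
    else suggestions
  PySem.List.slice suggestions none (some 3)

-- ===== PORT B =====
def pyB_KEYWORD_GROUP : PySem.Dict String Int :=
  PySem.Dict.mk
    [("farm", 0), ("crop", 0), ("plant", 0), ("agriculture", 0),
     ("fish", 1), ("aqua", 1), ("tilapia", 1), ("pond", 1),
     ("cmi", 2), ("office", 2), ("contact", 2), ("location", 2)]

def pyB_GROUP_SUGS : List (List String) :=
  [["Tell me about sustainable farming practices",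
    "What are the latest agricultural technologies?",
    "Find crop disease management guides"],
   ["Explain aquaculture best practices",
    "Show me fish farming techniques",
    "What are common fish diseases?"],
   ["Find all CMI office locations",
    "How to contact CMI experts?",
    "What services does CMI provide?"]]

def pyB_TITLE_FMT : PySem.Dict String (String × Int) :=
  PySem.Dict.mk [("faq", ("More about: ", 35)), ("forum", ("Join discussion: ", 30))]

-- one body of B's loop; KeyError on 'resource'/'type'/'title' stands in as `.getD` — excluded by Pre_
def pyB_emit (out : List String) (m : List (String × List (String × String))) : List String :=
  let resource : List (String × String) := ((PySem.Dict.mk m).get? "resource").getD []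
  match pyB_TITLE_FMT.get? (((PySem.Dict.mk resource).get? "type").getD "") with
  | some (p, n) =>
      out ++ [p ++ PySem.Str.slice (((PySem.Dict.mk resource).get? "title").getD "") none (some n) ++ "..."]
  | none => out

def generate_dynamic_suggestions_py_alt (query : String) (similar_content : List (List (String × List (String × String)))) : List String :=
  let hits : List Int :=
    (PySem.Str.split₀ (PySem.Str.lower query)).filterMap (fun w => pyB_KEYWORD_GROUP.get? w)
  match PySem.List.min? hits (fun x => x) with
  | some i => (PySem.List.pyGet? pyB_GROUP_SUGS i).getD []
  | none =>
    let out := (PySem.List.slice similar_content none (some 2)).foldl pyB_emit []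
    out ++ ["What can you help me with?"]

-- ===== PRECONDITION & SPEC =====
-- Pre_ excludes exactly the inputs where Python A raises KeyError: one of the first two matches
-- lacks 'resource', its resource lacks 'type', or has type 'faq'/'forum' but lacks 'title'.
def preOkA (m : List (String × List (String × String))) : Bool :=
  match (PySem.Dict.mk m).get? "resource" with
  | none => false
  | some r =>
    match (PySem.Dict.mk r).get? "type" with
    | none => false
    | some t =>
      if t == "faq" || t == "forum" then ((PySem.Dict.mk r).get? "title").isSome else true

def Pre_generate_dynamic_suggestions_py (query : String) (similar_content : List (List (String × List (String × String)))) : Prop :=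
  ∀ m ∈ similar_content.take 2, preOkA m = true
instance (query : String) (similar_content : List (List (String × List (String × String)))) : Decidable (Pre_generate_dynamic_suggestions_py query similar_content) := by unfold Pre_generate_dynamic_suggestions_py; infer_instance

def pvWitness_generate_dynamic_suggestions_py : String × (List (List (String × List (String × String)))) :=
  ("Tell me about farm crops", [])

def Spec_generate_dynamic_suggestions_py (query : String) (similar_content : List (List (String × List (String × String)))) (out : List String) : Prop := out = generate_dynamic_suggestions_py_alt query similar_content
instance (query : String) (similar_content : List (List (String × List (String × String)))) (out : List String) : Decidable (Spec_generate_dynamic_suggestions_py query similar_content out) := by unfold Spec_generate_dynamic_suggestions_py; infer_instance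

-- ===== CLAIM (what is proved, stated in full; the proofs are below) =====
def Claim_equal_generate_dynamic_suggestions_py : Prop := ∀ (query : String) (similar_content : List (List (String × List (String × String)))), Dom_generate_dynamic_suggestions_py query similar_content → Pre_generate_dynamic_suggestions_py query similar_content → Spec_generate_dynamic_suggestions_py query similar_content (generate_dynamic_suggestions_py query similar_content)

-- ===== LEMMAS AND PROOFS =====

-- lookups in B's keyword map, characterised per group
lemma kg_mem_g0 (w : String) (h : w ∈ ["farm", "crop", "plant", "agriculture"]) :
    pyB_KEYWORD_GROUP.get? w = some 0 := by
  fin_cases h <;> decide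

lemma kg_mem_g1 (w : String) (h : w ∈ ["fish", "aqua", "tilapia", "pond"]) :
    pyB_KEYWORD_GROUP.get? w = some 1 := by
  fin_cases h <;> decide

lemma kg_mem_g2 (w : String) (h : w ∈ ["cmi", "office", "contact", "location"]) :
    pyB_KEYWORD_GROUP.get? w = some 2 := by
  fin_cases h <;> decide

-- B's map, written out as the if-chain its literal reduces to
lemma kg_get (w : String) : pyB_KEYWORD_GROUP.get? w =
    if "farm" = w then some 0 else if "crop" = w then some 0 else if "plant" = w then some 0
    else if "agriculture" = w then some 0
    else if "fish" = w then some 1 else if "aqua" = w then some 1 else if "tilapia" = w then some 1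
    else if "pond" = w then some 1
    else if "cmi" = w then some 2 else if "office" = w then some 2 else if "contact" = w then some 2
    else if "location" = w then some 2 else none := by
  simp only [pyB_KEYWORD_GROUP, PySem.Dict.get?_mk_cons, beq_iff_eq]
  simp [PySem.Dict.get?]

set_option maxHeartbeats 2000000 in
lemma kg_cases (w : String) (v : Int) (h : pyB_KEYWORD_GROUP.get? w = some v) :
    (v = 0 ∧ w ∈ ["farm", "crop", "plant", "agriculture"]) ∨
    (v = 1 ∧ w ∈ ["fish", "aqua", "tilapia", "pond"]) ∨
    (v = 2 ∧ w ∈ ["cmi", "office", "contact", "location"]) := by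
  rw [kg_get] at h
  split_ifs at h with h1 h2 h3 h4 h5 h6 h7 h8 h9 h10 h11 h12 <;>
    simp only [Option.some.injEq] at h <;> subst_vars <;> simp

-- min(hits) = k when k is a member and a lower bound
lemma min?_eq_of_mem_of_le (l : List Int) (k : Int) (h : k ∈ l) (hge : ∀ x ∈ l, k ≤ x) :
    PySem.List.min? l (fun x => x) = some k := by
  cases hm : PySem.List.min? l (fun x => x) with
  | none => rw [PySem.List.min?_eq_none_iff] at hm; simp [hm] at h
  | some m =>
    have h1 := PySem.List.min?_mem hm
    have h2 := PySem.List.min?_isMin hm k h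
    have h3 := hge m h1
    have : m = k := le_antisymm (by simpa using h2) h3
    simp [this]

-- the two loop bodies are the same function
lemma emit_eq (out : List String) (m : List (String × List (String × String))) :
    pyB_emit out m = pyA_emit out m := by
  unfold pyB_emit pyA_emit
  simp only [pyB_TITLE_FMT, PySem.Dict.get?_mk_cons]
  generalize (((PySem.Dict.mk (((PySem.Dict.mk m).get? "resource").getD [])).get? "type").getD "" : String) = t
  by_cases h1 : t = "faq"
  · subst h1; simp
  · by_cases h2 : t = "forum"
    · subst h2; simp
    · simp [h1, h2, Ne.symm h1, Ne.symm h2, PySem.Dict.get?]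

lemma pyA_emit_shift (acc : List String) (m : List (String × List (String × String))) :
    pyA_emit acc m = acc ++ pyA_emit [] m := by
  simp only [pyA_emit]
  split_ifs <;> simp

lemma foldl_emit (l : List (List (String × List (String × String)))) (acc : List String) :
    l.foldl pyA_emit acc = acc ++ l.flatMap (fun m => pyA_emit [] m) := by
  induction l generalizing acc with
  | nil => simp
  | cons h t ih =>
    rw [List.foldl_cons, ih, pyA_emit_shift acc h, List.flatMap_cons, List.append_assoc]

lemma emit_len (m : List (String × List (String × String))) : (pyA_emit [] m).length ≤ 1 := by
  simp only [pyA_emit]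
  split_ifs <;> simp

lemma len_flatMap_emit_le (l : List (List (String × List (String × String)))) :
    (l.flatMap (fun m => pyA_emit [] m)).length ≤ l.length := by
  induction l with
  | nil => simp
  | cons h t ih =>
    rw [List.flatMap_cons, List.length_append, List.length_cons]
    have := emit_len h
    omega

-- no formatted title equals the first fallback string (the prefixes differ)
lemma emit_ne_fb (m : List (String × List (String × String))) (s : String)
    (hs : s ∈ pyA_emit [] m) : s ≠ "What can you help me with?" := by
  simp only [pyA_emit] at hs
  split_ifs at hs <;> simp at hs <;>
    · subst hs
      intro h
      have h2 := congrArg (fun s => s.toList.head?) h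
      simp [String.toList_append] at h2

-- A's result once a domain group matched: the [:3] returns exactly the matched triple
lemma slice3_append (S rest : List String) (h : S.length = 3) :
    PySem.List.slice (S ++ rest) none (some 3) = S := by
  rw [PySem.List.slice_to]
  · rw [List.take_append_of_le_length (by omega), List.take_of_length_le (by omega)]
  · norm_num

-- ===== VERDICT (by name: the statement is the Claim_ definition above) =====
theorem generate_dynamic_suggestions_py_spec : Claim_equal_generate_dynamic_suggestions_py := by
  intro query similar_content _ _
  unfold Spec_generate_dynamic_suggestions_py
  unfold generate_dynamic_suggestions_py generate_dynamic_suggestions_py_alt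
  simp only [List.any_eq_true, List.contains_iff_mem]
  set qw := PySem.Str.split₀ (PySem.Str.lower query) with hqw
  set hits := qw.filterMap (fun w => pyB_KEYWORD_GROUP.get? w) with hhits
  set sl := PySem.List.slice similar_content none (some 2) with hsl
  have hsl_len : sl.length ≤ 2 := by
    rw [hsl, PySem.List.slice_to]
    · simp
    · norm_num
  -- every hit index is 0, 1 or 2, produced by a query word of the named group
  have hits_src : ∀ v ∈ hits, ∃ w ∈ qw,
      (v = 0 ∧ w ∈ ["farm", "crop", "plant", "agriculture"]) ∨
      (v = 1 ∧ w ∈ ["fish", "aqua", "tilapia", "pond"]) ∨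
      (v = 2 ∧ w ∈ ["cmi", "office", "contact", "location"]) := by
    intro v hv
    rw [hhits, List.mem_filterMap] at hv
    obtain ⟨w, hw, hg⟩ := hv
    exact ⟨w, hw, kg_cases w v hg⟩
  by_cases hg0 : ∃ w ∈ (["farm", "crop", "plant", "agriculture"] : List String), w ∈ qw
  · -- group 0 matched: min hit = 0, both sides return the first triple
    obtain ⟨k, hk, hkq⟩ := hg0
    have h0in : (0 : Int) ∈ hits := by
      rw [hhits, List.mem_filterMap]
      exact ⟨k, hkq, kg_mem_g0 k hk⟩
    have hmin : PySem.List.min? hits (fun x => x) = some 0 := by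
      refine min?_eq_of_mem_of_le hits 0 h0in ?_
      intro x hx
      obtain ⟨w, _, hc⟩ := hits_src x hx
      rcases hc with ⟨rfl, _⟩ | ⟨rfl, _⟩ | ⟨rfl, _⟩ <;> omega
    rw [if_pos (show ∃ w ∈ (["farm", "crop", "plant", "agriculture"] : List String), w ∈ qw from ⟨k, hk, hkq⟩), hmin]
    rw [foldl_emit,
        if_neg (by simp only [List.length_append, List.length_cons, List.length_nil]; omega),
        slice3_append _ _ (by rfl)]
    rfl
  · have hno0 : ∀ w ∈ qw, w ∉ (["farm", "crop", "plant", "agriculture"] : List String) :=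
      fun w hw hmem => hg0 ⟨w, hmem, hw⟩
    by_cases hg1 : ∃ w ∈ (["fish", "aqua", "tilapia", "pond"] : List String), w ∈ qw
    · obtain ⟨k, hk, hkq⟩ := hg1
      have h1in : (1 : Int) ∈ hits := by
        rw [hhits, List.mem_filterMap]
        exact ⟨k, hkq, kg_mem_g1 k hk⟩
      have hmin : PySem.List.min? hits (fun x => x) = some 1 := by
        refine min?_eq_of_mem_of_le hits 1 h1in ?_
        intro x hx
        obtain ⟨w, hwq, hc⟩ := hits_src x hx
        rcases hc with ⟨rfl, hg⟩ | ⟨rfl, _⟩ | ⟨rfl, _⟩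
        · exact absurd hg (hno0 w hwq)
        · omega
        · omega
      rw [if_neg hg0, if_pos (show ∃ w ∈ (["fish", "aqua", "tilapia", "pond"] : List String), w ∈ qw from ⟨k, hk, hkq⟩), hmin]
      rw [foldl_emit,
          if_neg (by simp only [List.length_append, List.length_cons, List.length_nil]; omega),
          slice3_append _ _ (by rfl)]
      rfl
    · have hno1 : ∀ w ∈ qw, w ∉ (["fish", "aqua", "tilapia", "pond"] : List String) :=
        fun w hw hmem => hg1 ⟨w, hmem, hw⟩
      by_cases hg2 : ∃ w ∈ (["cmi", "office", "contact", "location"] : List String), w ∈ qw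
      · obtain ⟨k, hk, hkq⟩ := hg2
        have h2in : (2 : Int) ∈ hits := by
          rw [hhits, List.mem_filterMap]
          exact ⟨k, hkq, kg_mem_g2 k hk⟩
        have hmin : PySem.List.min? hits (fun x => x) = some 2 := by
          refine min?_eq_of_mem_of_le hits 2 h2in ?_
          intro x hx
          obtain ⟨w, hwq, hc⟩ := hits_src x hx
          rcases hc with ⟨rfl, hg⟩ | ⟨rfl, hg⟩ | ⟨rfl, _⟩
          · exact absurd hg (hno0 w hwq)
          · exact absurd hg (hno1 w hwq)
          · omega
        rw [if_neg hg0, if_neg hg1, if_pos (show ∃ w ∈ (["cmi", "office", "contact", "location"] : List String), w ∈ qw from ⟨k, hk, hkq⟩), hmin]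
        rw [foldl_emit,
            if_neg (by simp only [List.length_append, List.length_cons, List.length_nil]; omega),
            slice3_append _ _ (by rfl)]
        rfl
      · -- no group matched: hits is empty, both sides take the content-plus-fallback path
        have hno2 : ∀ w ∈ qw, w ∉ (["cmi", "office", "contact", "location"] : List String) :=
          fun w hw hmem => hg2 ⟨w, hmem, hw⟩
        have hits_nil : hits = [] := by
          rw [hhits, List.filterMap_eq_nil_iff]
          intro w hw
          cases hv : pyB_KEYWORD_GROUP.get? w with
          | none => rfl
          | some v =>
            rcases kg_cases w v hv with ⟨_, hg⟩ | ⟨_, hg⟩ | ⟨_, hg⟩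
            · exact absurd hg (hno0 w hw)
            · exact absurd hg (hno1 w hw)
            · exact absurd hg (hno2 w hw)
        have hmin : PySem.List.min? hits (fun x => x) = none := by
          rw [PySem.List.min?_eq_none_iff]; exact hits_nil
        rw [if_neg hg0, if_neg hg1, if_neg hg2, hmin]
        have hemit : pyB_emit = pyA_emit := funext fun a => funext fun m => emit_eq a m
        rw [hemit, foldl_emit]
        simp only [List.nil_append]
        set out := sl.flatMap (fun m => pyA_emit [] m) with hout
        have hlen : out.length ≤ 2 := le_trans (len_flatMap_emit_le sl) hsl_len
        have hnotin : "What can you help me with?" ∉ out := by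
          intro hc
          rw [hout, List.mem_flatMap] at hc
          obtain ⟨m, _, hs⟩ := hc
          exact emit_ne_fb m _ hs rfl
        rw [if_pos (by omega), List.find?_cons_of_pos (by simp [hnotin])]
        rw [PySem.List.slice_to]
        · rw [List.take_of_length_le (by simp; omega)]
        · norm_num
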